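-- pv_equiv track=rewrite | github.com/ilanazane/leetcode | 1415HappyStrings.py | product_no_repeats
-- ===== SOURCE A (Python) =====
-- import itertools
--
-- def product_no_repeats(input, n, k):
--
--     # asterisk unpacks the list
--     for combinations in itertools.product(*input, repeat=n):
--         is_consecutive = False
--         for i in range(len(combinations) - 1):
--             # compare consecutive letters
--             if combinations[i] == combinations[i + 1]:
--                 is_consecutive = True
--                 break
--         if not is_consecutive:
--             # if not consecutive then generate the combination
--             yield combinations
--
--     return combinations
-- ===== SOURCE B (Python) =====
-- def product_no_repeats(input, n, k):
--     # Build only the valid suffixes, right to left: extend each suffix with a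
--     # letter different from its first letter, so invalid branches are pruned
--     # as soon as a repeat would appear (A generates all k^n tuples and filters).
--     pools = [list(s) for s in input] * n
--     suffixes = [()]
--     for pool in reversed(pools):
--         suffixes = [(c,) + t for c in pool for t in suffixes if not t or c != t[0]]
--     yield from suffixes
-- ===== Notes on version B (the rewrite author's own statement) =====
-- stated objective: faster
-- what changed: A materialises the full k^n cartesian product and filters out tuples with equal adjacent letters; B builds only the valid suffixes right-to-left (a pruned fold), extending a suffix only with a letter different from its first letter, so invalid branches die at their first repeat.
import Mathlib
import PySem

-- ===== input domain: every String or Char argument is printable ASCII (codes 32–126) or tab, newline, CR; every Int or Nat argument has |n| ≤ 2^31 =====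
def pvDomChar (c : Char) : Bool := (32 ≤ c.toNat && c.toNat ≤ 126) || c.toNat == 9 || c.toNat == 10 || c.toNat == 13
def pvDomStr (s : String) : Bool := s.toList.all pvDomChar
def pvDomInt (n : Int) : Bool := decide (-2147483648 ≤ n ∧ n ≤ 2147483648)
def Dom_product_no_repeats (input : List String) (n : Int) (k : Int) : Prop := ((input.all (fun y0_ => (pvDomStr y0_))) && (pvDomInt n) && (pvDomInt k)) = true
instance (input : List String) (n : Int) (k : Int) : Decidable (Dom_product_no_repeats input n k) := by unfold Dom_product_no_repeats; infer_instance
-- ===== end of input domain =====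

-- B replaces A's generate-the-whole-k^n-product-then-filter with a right-to-left pruned
-- suffix build that never prepends a letter equal to the suffix's first letter (objective:
-- faster). Both A and B are generators in Python; the value compared is the yielded list.

-- ===== PORT A =====
-- the pools itertools.product iterates over: each input string as its list of 1-char strings,
-- the whole sequence repeated n times
def pvPools (input : List String) (n : Int) : List (List String) :=
  (List.replicate n.toNat (input.map (fun s => s.toList.map (fun c => String.ofList [c])))).flatten

-- itertools.product over a list of pools, in Python's (lexicographic) order
def pyProduct : List (List String) → List (List String)
  | [] => [[]]
  | p :: rest => p.flatMap (fun c => (pyProduct rest).map (fun t => c :: t))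

-- A's inner loop: scan consecutive positions, stop at the first equal pair
def hasConsec : List String → Bool
  | a :: b :: rest => if a == b then true else hasConsec (b :: rest)
  | _ => false

def product_no_repeats (input : List String) (n : Int) (k : Int) : List (List String) :=
  (pyProduct (pvPools input n)).filter (fun t => !hasConsec t)

-- ===== PORT B =====
-- one step of B's loop: [(c,) + t for c in pool for t in suffixes if not t or c != t[0]]
def extendB (pool : List String) (suffixes : List (List String)) : List (List String) :=
  pool.flatMap (fun c =>
    suffixes.flatMap (fun t =>
      if (match t with | [] => true | d :: _ => c ≠ d) then [c :: t] else []))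

-- B's 'for pool in reversed(pools)' loop over the accumulator 'suffixes' is a right fold
def product_no_repeats_alt (input : List String) (n : Int) (k : Int) : List (List String) :=
  (pvPools input n).foldr extendB [[]]

-- ===== PRECONDITION & SPEC =====
-- Pre_ excludes exactly the inputs where A raises: n < 0 (ValueError from repeat=n) and
-- n ≥ 1 with an empty string in input (the product is empty, so A's trailing
-- 'return combinations' raises UnboundLocalError when the generator is exhausted).
def Pre_product_no_repeats (input : List String) (n : Int) (k : Int) : Prop :=
  0 ≤ n ∧ (n = 0 ∨ "" ∉ input)
instance (input : List String) (n : Int) (k : Int) : Decidable (Pre_product_no_repeats input n k) := by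
  unfold Pre_product_no_repeats; infer_instance

def pvWitness_product_no_repeats : List String × Int × Int := (["ab", "c"], 2, 0)

def Spec_product_no_repeats (input : List String) (n : Int) (k : Int) (out : List (List String)) : Prop := out = product_no_repeats_alt input n k
instance (input : List String) (n : Int) (k : Int) (out : List (List String)) : Decidable (Spec_product_no_repeats input n k out) := by unfold Spec_product_no_repeats; infer_instance

-- ===== CLAIM (what is proved, stated in full; the proofs are below) =====
def Claim_equal_product_no_repeats : Prop := ∀ (input : List String) (n : Int) (k : Int), Dom_product_no_repeats input n k → Pre_product_no_repeats input n k → Spec_product_no_repeats input n k (product_no_repeats input n k)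

-- ===== LEMMAS AND PROOFS =====

-- a comprehension '[c :: t for t in l if cond t]' written as flatMap of if-singletons
theorem flatMap_if_singleton (c : String) (p : List String → Bool) (l : List (List String)) :
    (l.flatMap (fun t => if p t then [c :: t] else [])) = (l.filter p).map (fun t => c :: t) := by
  induction l with
  | nil => rfl
  | cons t rest ih =>
      by_cases h : p t <;> simp [List.flatMap_cons, h, ih]

-- !hasConsec splits into "head differs from the next letter" and "!hasConsec of the tail"
theorem not_hasConsec_cons (c : String) (t : List String) :
    (!hasConsec (c :: t)) =
      ((match t with | [] => true | d :: _ => decide (c ≠ d)) && !hasConsec t) := by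
  cases t with
  | nil => rfl
  | cons d rest =>
      by_cases h : c = d <;> simp [hasConsec, h]

theorem foldr_extendB_eq_filter (pools : List (List String)) :
    pools.foldr extendB [[]] = (pyProduct pools).filter (fun t => !hasConsec t) := by
  induction pools with
  | nil => rfl
  | cons p rest ih =>
      simp only [List.foldr_cons, ih, extendB, pyProduct, List.filter_flatMap,
        List.filter_map]
      congr 1
      funext c
      rw [flatMap_if_singleton, List.filter_filter]
      congr 1
      apply List.filter_congr
      intro t _
      rw [Function.comp_apply, not_hasConsec_cons, Bool.and_comm]

-- ===== VERDICT (by name: the statement is the Claim_ definition above) =====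
theorem product_no_repeats_spec : Claim_equal_product_no_repeats := by
  intro input n k _ _
  unfold Spec_product_no_repeats product_no_repeats product_no_repeats_alt
  rw [foldr_extendB_eq_filter]
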